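-- pv_equiv track=rewrite | github.com/Yang-Jianlin/python-learn | python数据结构与算法/sixth_chapter/C-6.22.py | express_list
-- ===== SOURCE A (Python) =====
-- def express_list(str):
--     l = []
--     i = 0
--     while i < len(str):
--         if not str[i].isnumeric():
--             l.append(str[i])
--             i += 1
--         else:
--             j = i + 1
--             s = str[i]
--             while j < len(str) and str[j].isnumeric():
--                 s = s + str[j]
--                 j += 1
--             l.append(s)
--             i = j
--     return l
-- ===== SOURCE B (Python) =====
-- def express_list(str):
--     # one right-to-left pass with a pending digit-run buffer; output built back-to-front
--     out = []
--     digits = []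
--     for c in reversed(str):
--         if c.isnumeric():
--             digits.append(c)
--         else:
--             if digits:
--                 out.append(''.join(reversed(digits)))
--                 digits = []
--             out.append(c)
--     if digits:
--         out.append(''.join(reversed(digits)))
--     out.reverse()
--     return out
-- ===== Notes on version B (the rewrite author's own statement) =====
-- stated objective: faster
-- what changed: replaces A's index cursor with a nested run-collecting inner loop (which grows the run string by repeated concatenation) by a single right-to-left pass keeping a pending digit buffer joined once per run, building the token list back-to-front
import Mathlib
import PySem

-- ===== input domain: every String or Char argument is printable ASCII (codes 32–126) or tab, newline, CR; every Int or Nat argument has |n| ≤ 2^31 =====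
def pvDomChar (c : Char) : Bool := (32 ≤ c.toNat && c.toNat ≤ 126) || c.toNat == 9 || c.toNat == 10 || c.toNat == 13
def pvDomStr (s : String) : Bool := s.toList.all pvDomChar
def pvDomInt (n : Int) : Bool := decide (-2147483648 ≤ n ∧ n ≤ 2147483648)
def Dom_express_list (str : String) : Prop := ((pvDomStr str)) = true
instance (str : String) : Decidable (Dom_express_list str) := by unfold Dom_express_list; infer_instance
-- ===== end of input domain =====

-- B changes the traversal: one right-to-left pass with a pending digit-run buffer, output built back-to-front (alternative decomposition; .isnumeric() ported as PySem.Chars.isdigit, exact on the ASCII domain).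

-- ===== PORT A =====
-- inner while loop of A: s = s + str[j] while str[j] is numeric; returns (s, remaining chars)
def pvSpanA : List Char → List Char → List Char × List Char
  | [], s => (s, [])
  | c :: rest, s => if PySem.Chars.isdigit c then pvSpanA rest (s ++ [c]) else (s, c :: rest)

theorem pvSpanA_eq : ∀ (l s : List Char),
    pvSpanA l s = (s ++ l.takeWhile PySem.Chars.isdigit, l.dropWhile PySem.Chars.isdigit) := by
  intro l
  induction l with
  | nil => intro s; simp [pvSpanA]
  | cons c rest ih =>
    intro s
    by_cases h : PySem.Chars.isdigit c
    · simp [pvSpanA, h, ih, List.takeWhile_cons, List.dropWhile_cons]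
    · simp [pvSpanA, h, List.takeWhile_cons, List.dropWhile_cons]

-- outer while loop of A over the remaining characters
def pvLoopA : List Char → List String
  | [] => []
  | c :: rest =>
    if PySem.Chars.isdigit c then
      let p := pvSpanA rest [c]
      String.mk p.1 :: pvLoopA p.2
    else
      String.mk [c] :: pvLoopA rest
termination_by l => l.length
decreasing_by
  · rw [pvSpanA_eq]
    simpa using Nat.lt_succ_of_le (List.length_dropWhile_le _ _)
  · simp

def express_list (str : String) : List String := pvLoopA str.toList

-- ===== PORT B =====
-- loop body of B: state = (out tokens so far, pending digit chars, both in build order)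
def pvStepB (st : List String × List Char) (c : Char) : List String × List Char :=
  if PySem.Chars.isdigit c then (st.1, st.2 ++ [c])
  else if st.2 ≠ [] then (st.1 ++ [String.mk st.2.reverse, String.mk [c]], [])
  else (st.1 ++ [String.mk [c]], [])

def express_list_alt (str : String) : List String :=
  let st := str.toList.reverse.foldl pvStepB ([], [])
  let out := if st.2 ≠ [] then st.1 ++ [String.mk st.2.reverse] else st.1
  out.reverse

-- ===== PRECONDITION & SPEC =====
def Spec_express_list (str : String) (out : List String) : Prop := out = express_list_alt str
instance (str : String) (out : List String) : Decidable (Spec_express_list str out) := by unfold Spec_express_list; infer_instance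

-- ===== CLAIM (what is proved, stated in full; the proofs are below) =====
def Claim_equal_express_list : Prop := ∀ (str : String), Dom_express_list str → Spec_express_list str (express_list str)

-- ===== LEMMAS AND PROOFS =====

theorem pvLoopA_digit_run (l : List Char) (h : l.takeWhile PySem.Chars.isdigit ≠ []) :
    pvLoopA l = String.mk (l.takeWhile PySem.Chars.isdigit)
      :: pvLoopA (l.dropWhile PySem.Chars.isdigit) := by
  match l with
  | [] => simp at h
  | c :: rest =>
    by_cases hc : PySem.Chars.isdigit c
    · rw [pvLoopA]
      simp [hc, pvSpanA_eq, List.takeWhile_cons, List.dropWhile_cons]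
    · simp [List.takeWhile_cons, hc] at h

-- the right-to-left fold of B computes: the reversed pending leading digit run,
-- and (reversed) A's tokens of the rest
theorem pvFoldB_inv : ∀ (l : List Char),
    l.reverse.foldl pvStepB ([], []) =
      ((pvLoopA (l.dropWhile PySem.Chars.isdigit)).reverse,
        (l.takeWhile PySem.Chars.isdigit).reverse) := by
  intro l
  induction l with
  | nil => simp [pvLoopA]
  | cons c rest ih =>
    rw [List.reverse_cons, List.foldl_append, ih]
    by_cases hc : PySem.Chars.isdigit c
    · simp [pvStepB, hc, List.takeWhile_cons, List.dropWhile_cons]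
    · by_cases ht : rest.takeWhile PySem.Chars.isdigit = []
      · have hdrop : rest.dropWhile PySem.Chars.isdigit = rest := by
          cases rest with
          | nil => simp
          | cons d l' =>
            simp only [List.takeWhile_cons] at ht
            by_cases hd : PySem.Chars.isdigit d
            · simp [hd] at ht
            · simp [List.dropWhile_cons, hd]
        have h1 : pvLoopA (c :: rest) = String.mk [c] :: pvLoopA rest := by
          rw [pvLoopA.eq_def]
          simp [hc]
        simp [pvStepB, hc, ht, hdrop, h1]
      · have h1 : pvLoopA (c :: rest) = String.mk [c]
            :: String.mk (rest.takeWhile PySem.Chars.isdigit)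
            :: pvLoopA (rest.dropWhile PySem.Chars.isdigit) := by
          rw [pvLoopA.eq_def]
          simp [hc, pvLoopA_digit_run rest ht]
        simp [pvStepB, hc, ht, List.takeWhile_cons, List.dropWhile_cons, h1]

-- ===== VERDICT (by name: the statement is the Claim_ definition above) =====
theorem express_list_spec : Claim_equal_express_list := by
  intro str _
  unfold Spec_express_list express_list express_list_alt
  rw [pvFoldB_inv]
  by_cases ht : str.toList.takeWhile PySem.Chars.isdigit = []
  · have hdrop : str.toList.dropWhile PySem.Chars.isdigit = str.toList := by
      cases h : str.toList with
      | nil => simp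
      | cons d l' =>
        rw [h] at ht
        simp only [List.takeWhile_cons] at ht
        by_cases hd : PySem.Chars.isdigit d
        · simp [hd] at ht
        · simp [List.dropWhile_cons, hd]
    simp [ht, hdrop]
  · rw [pvLoopA_digit_run _ ht]
    simp [ht]
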